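-- pv_equiv track=rewrite | github.com/klimarichard/project_euler | src/problems_76-100/79_passcode_derivation.py | find_before_and_after
-- ===== SOURCE A (Python) =====
-- def find_before_and_after(logins):
--     """
--     Finds numbers, that come before and after each number
--     in the logins.
--     :param logins: list of successful logins
--     :return: numbers before and after each number
--     """
--     before = {0: set(), 1: set(), 2: set(), 3: set(), 4: set(), 5: set(), 6: set(), 7: set(), 8: set(), 9: set()}
--     after = {0: set(), 1: set(), 2: set(), 3: set(), 4: set(), 5: set(), 6: set(), 7: set(), 8: set(), 9: set()}
--     logins = list(map(str, sorted(set(logins))))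
--
--     for k in range(len(logins)):
--         before[int(logins[k][1])] |= {int(logins[k][0])}
--         before[int(logins[k][2])] |= {int(logins[k][1])}
--         after[int(logins[k][0])] |= {int(logins[k][1])}
--         after[int(logins[k][1])] |= {int(logins[k][2])}
--
--     keys = list(before.keys())
--
--     # exclude numbers, that are not in any successful login
--     for k in keys:
--         if before[k] == set() and after[k] == set():
--             before.pop(k)
--             after.pop(k)
--
--     return before, after
-- ===== SOURCE B (Python) =====
-- def find_before_and_after(logins):
--     """
--     Finds numbers, that come before and after each number
--     in the logins.
--     :param logins: list of successful logins
--     :return: numbers before and after each number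
--     """
--     pairs = set()
--     for s in map(str, sorted(set(logins))):
--         pairs.add((int(s[0]), int(s[1])))
--         pairs.add((int(s[1]), int(s[2])))
--     digits = sorted({d for p in pairs for d in p})
--     before = {d: {x for (x, y) in pairs if y == d} for d in digits}
--     after = {d: {y for (x, y) in pairs if x == d} for d in digits}
--     return before, after
-- ===== Notes on version B (the rewrite author's own statement) =====
-- stated objective: alternative
-- what changed: B is a relational/staged decomposition: it first materialises the set of adjacent digit pairs from the deduplicated sorted logins, then derives the active-digit key set from those pairs, and builds before/after by filtering the pair relation per key, instead of A's stateful pass that unions into ten pre-filled dict entries and deletes the empty ones afterwards.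
import Mathlib
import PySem

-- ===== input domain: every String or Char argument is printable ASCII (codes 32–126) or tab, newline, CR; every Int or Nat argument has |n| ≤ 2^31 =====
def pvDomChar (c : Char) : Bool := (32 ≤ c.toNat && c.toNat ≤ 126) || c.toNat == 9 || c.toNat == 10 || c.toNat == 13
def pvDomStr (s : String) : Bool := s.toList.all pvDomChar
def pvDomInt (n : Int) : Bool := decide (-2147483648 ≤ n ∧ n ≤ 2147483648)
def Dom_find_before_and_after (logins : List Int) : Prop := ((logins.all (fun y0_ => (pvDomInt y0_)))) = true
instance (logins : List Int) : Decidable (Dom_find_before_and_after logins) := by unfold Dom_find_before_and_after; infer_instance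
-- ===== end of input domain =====

-- B is a relational/staged decomposition: it first materialises the set of adjacent digit pairs,
-- then derives the active-digit key set from those pairs, and builds before/after by filtering
-- the pair relation per key, instead of A's stateful union-into-prefilled-dicts-then-prune pass.

-- ===== PORT A =====
def find_before_and_after (logins : List Int) : (List (Int × List Int)) × (List (Int × List Int)) :=
  let before0 : PySem.Dict Int (PySem.Set Int) :=
    PySem.Dict.ofList [(0,[]),(1,[]),(2,[]),(3,[]),(4,[]),(5,[]),(6,[]),(7,[]),(8,[]),(9,[])]
  let after0 : PySem.Dict Int (PySem.Set Int) :=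
    PySem.Dict.ofList [(0,[]),(1,[]),(2,[]),(3,[]),(4,[]),(5,[]),(6,[]),(7,[]),(8,[]),(9,[])]
  -- logins = list(map(str, sorted(set(logins))))
  let ls : List (List Char) :=
    (PySem.List.sorted (PySem.Set.ofList logins) (fun x => x)).map PySem.Int.toChars
  -- for k in range(len(logins)): ...
  let st := (PySem.List.pyRange 0 (PySem.List.len ls)).foldl (fun st k =>
    let s := PySem.List.pyGetD ls k []
    -- int(logins[k][i]); out of range / non-digit excluded by Pre_
    let i0 := (PySem.Int.ofChars? [PySem.List.pyGetD s 0 ' ']).getD 0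
    let i1 := (PySem.Int.ofChars? [PySem.List.pyGetD s 1 ' ']).getD 0
    let i2 := (PySem.Int.ofChars? [PySem.List.pyGetD s 2 ' ']).getD 0
    let b1 := st.1.insert i1 (PySem.Set.union (st.1.getD i1 []) [i0])
    let b2 := b1.insert i2 (PySem.Set.union (b1.getD i2 []) [i1])
    let a1 := st.2.insert i0 (PySem.Set.union (st.2.getD i0 []) [i1])
    let a2 := a1.insert i1 (PySem.Set.union (a1.getD i1 []) [i2])
    (b2, a2)) (before0, after0)
  -- keys = list(before.keys()); for k in keys: if before[k] == set() and after[k] == set(): pop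
  let keys := st.1.keys
  let st2 := keys.foldl (fun st k =>
    if PySem.Set.equal (st.1.getD k []) [] && PySem.Set.equal (st.2.getD k []) [] then
      (st.1.erase k, st.2.erase k)
    else st) st
  (st2.1.items, st2.2.items)

-- ===== PORT B =====
def find_before_and_after_alt (logins : List Int) : (List (Int × List Int)) × (List (Int × List Int)) :=
  -- pairs = set(); for s in map(str, sorted(set(logins))): pairs.add((int(s[0]),int(s[1]))); pairs.add((int(s[1]),int(s[2])))
  let pairs : PySem.Set (Int × Int) :=
    ((PySem.List.sorted (PySem.Set.ofList logins) (fun x => x)).map PySem.Int.toChars).foldl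
      (fun P s =>
        let d0 := (PySem.Int.ofChars? [PySem.List.pyGetD s 0 ' ']).getD 0
        let d1 := (PySem.Int.ofChars? [PySem.List.pyGetD s 1 ' ']).getD 0
        let d2 := (PySem.Int.ofChars? [PySem.List.pyGetD s 2 ' ']).getD 0
        PySem.Set.add (PySem.Set.add P (d0, d1)) (d1, d2)) []
  -- digits = sorted({d for p in pairs for d in p})
  let digits := PySem.List.sorted
    (pairs.foldl (fun D (p : Int × Int) => PySem.Set.add (PySem.Set.add D p.1) p.2) ([] : PySem.Set Int))
    (fun x => x)
  -- before = {d: {x for (x, y) in pairs if y == d} for d in digits}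
  let before := digits.foldl (fun d k =>
      d.insert k (pairs.foldl (fun s (p : Int × Int) => if p.2 = k then PySem.Set.add s p.1 else s)
        ([] : PySem.Set Int))) (PySem.Dict.mk [])
  -- after = {d: {y for (x, y) in pairs if x == d} for d in digits}
  let after := digits.foldl (fun d k =>
      d.insert k (pairs.foldl (fun s (p : Int × Int) => if p.1 = k then PySem.Set.add s p.2 else s)
        ([] : PySem.Set Int))) (PySem.Dict.mk [])
  (before.items, after.items)

-- ===== PRECONDITION & SPEC =====
-- Pre_ excludes exactly the inputs on which A raises: any login below 100 makes str(n) shorter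
-- than 3 characters (IndexError) or gives it a leading '-' (ValueError in int()).
def Pre_find_before_and_after (logins : List Int) : Prop := ∀ x ∈ logins, 100 ≤ x
instance (logins : List Int) : Decidable (Pre_find_before_and_after logins) := by unfold Pre_find_before_and_after; infer_instance
def pvWitness_find_before_and_after : List Int := [123, 320, 12345]

def Spec_find_before_and_after (logins : List Int) (out : (List (Int × List Int)) × (List (Int × List Int))) : Prop := out = find_before_and_after_alt logins
instance (logins : List Int) (out : (List (Int × List Int)) × (List (Int × List Int))) : Decidable (Spec_find_before_and_after logins out) := by unfold Spec_find_before_and_after; infer_instance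

-- ===== CLAIM (what is proved, stated in full; the proofs are below) =====
def Claim_equal_find_before_and_after : Prop := ∀ (logins : List Int), Dom_find_before_and_after logins → Pre_find_before_and_after logins → Spec_find_before_and_after logins (find_before_and_after logins)


-- ===== LEMMAS AND PROOFS =====

-- ---------- digit-string facts ----------

-- spec form of Nat.toDigits 10
def natChars (m : Nat) : List Char :=
  if m < 10 then [Nat.digitChar m] else natChars (m / 10) ++ [Nat.digitChar (m % 10)]
termination_by m
decreasing_by omega

lemma natChars_step {m : Nat} (h : 10 ≤ m) :
    natChars m = natChars (m / 10) ++ [Nat.digitChar (m % 10)] := by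
  rw [natChars]; simp [Nat.not_lt.2 h]

lemma natChars_base {m : Nat} (h : m < 10) : natChars m = [Nat.digitChar m] := by
  rw [natChars]; simp [h]

lemma toDigitsCore_eq_natChars (f : Nat) : ∀ n l, n < f →
    Nat.toDigitsCore 10 f n l = natChars n ++ l := by
  induction f with
  | zero => intro n l h; omega
  | succ f ih =>
    intro n l h
    rw [Nat.toDigitsCore]
    by_cases h10 : n < 10
    · have : n / 10 = 0 := by omega
      simp [this, natChars_base h10, Nat.mod_eq_of_lt h10]
    · have hne : n / 10 ≠ 0 := by omega
      simp only [hne, if_false]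
      rw [ih (n / 10) _ (by omega), natChars_step (m := n) (by omega)]
      simp

lemma toChars_eq_natChars (n : Int) (h : 0 ≤ n) :
    PySem.Int.toChars n = natChars n.toNat := by
  have h1 : ¬ n < 0 := by omega
  simp only [PySem.Int.toChars, if_neg h1]
  rw [Nat.toDigits, toDigitsCore_eq_natChars (n.toNat + 1) n.toNat [] (by omega)]
  simp

lemma natChars_length_pos (m : Nat) : 0 < (natChars m).length := by
  rw [natChars]; split <;> simp

lemma natChars_len3 {m : Nat} (h : 100 ≤ m) : 3 ≤ (natChars m).length := by
  rw [natChars_step (by omega), natChars_step (by omega)]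
  have := natChars_length_pos (m / 10 / 10)
  simp; omega

-- int() of a single digit character
lemma ofChars_digitChar {d : Nat} (h : d < 10) :
    PySem.Int.ofChars? [Nat.digitChar d] = some (d : Int) := by
  interval_cases d <;> rfl

-- while m >= 1000: m //= 10, on Nat
def natReduce (m : Nat) : Nat :=
  if m < 1000 then m else natReduce (m / 10)
termination_by m
decreasing_by omega

lemma natReduce_base {m : Nat} (h : m < 1000) : natReduce m = m := by
  rw [natReduce]; simp [h]

lemma natReduce_step {m : Nat} (h : 1000 ≤ m) : natReduce m = natReduce (m / 10) := by
  rw [natReduce]; simp [Nat.not_lt.2 h]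

-- arithmetic view of the three leading characters, used only by the proofs
def pvReduce (n : Int) : Int :=
  if _h : 1000 ≤ n then pvReduce (PySem.Int.floordiv n 10) else n
termination_by n.toNat
decreasing_by
  have : PySem.Int.floordiv n 10 = n / 10 := PySem.Int.floordiv_eq_ediv_of_pos (by omega)
  rw [this]; omega

lemma pvReduce_eq_natReduce : ∀ (m : Nat) (n : Int), 0 ≤ n → n.toNat = m →
    pvReduce n = (natReduce m : Int) := by
  intro m
  induction m using Nat.strong_induction_on with
  | _ m ih =>
    intro n h0 hm
    rw [pvReduce]
    by_cases h : 1000 ≤ n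
    · have hd : PySem.Int.floordiv n 10 = n / 10 := PySem.Int.floordiv_eq_ediv_of_pos (by omega)
      rw [dif_pos h, hd, ih (m / 10) (by omega) (n / 10) (by omega) (by omega),
        natReduce_step (m := m) (by omega)]
    · rw [dif_neg h, natReduce_base (by omega)]; omega

lemma natReduce_bounds : ∀ m : Nat, 100 ≤ m → 100 ≤ natReduce m ∧ natReduce m < 1000 := by
  intro m
  induction m using Nat.strong_induction_on with
  | _ m ih =>
    intro h
    by_cases h1 : m < 1000
    · rw [natReduce_base h1]; omega
    · rw [natReduce_step (m := m) (by omega)]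
      exact ih (m / 10) (by omega) (by omega)

lemma pvReduce_bounds {n : Int} (h : 100 ≤ n) :
    100 ≤ pvReduce n ∧ pvReduce n < 1000 := by
  rw [pvReduce_eq_natReduce n.toNat n (by omega) rfl]
  have := natReduce_bounds n.toNat (by omega)
  omega

-- the three leading decimal digits, arithmetically (shared spec of both ports' int(s[i]))
def pvDigs (n : Int) : Int × Int × Int :=
  (PySem.Int.floordiv (pvReduce n) 100,
   PySem.Int.mod (PySem.Int.floordiv (pvReduce n) 10) 10,
   PySem.Int.mod (pvReduce n) 10)

lemma natChars_get (m : Nat) (h : 100 ≤ m) :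
    (natChars m)[0]? = some (Nat.digitChar (natReduce m / 100)) ∧
    (natChars m)[1]? = some (Nat.digitChar (natReduce m / 10 % 10)) ∧
    (natChars m)[2]? = some (Nat.digitChar (natReduce m % 10)) := by
  induction m using Nat.strong_induction_on with
  | _ m ih =>
    by_cases h1 : m < 1000
    · rw [natReduce_base h1, natChars_step (by omega), natChars_step (by omega),
        natChars_base (by omega : m / 10 / 10 < 10)]
      have e : m / 10 / 10 = m / 100 := by omega
      simp [e]
    · rw [natReduce_step (m := m) (by omega), natChars_step (m := m) (by omega)]
      have h3 := natChars_len3 (by omega : 100 ≤ m / 10)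
      have := ih (m / 10) (by omega) (by omega)
      refine ⟨?_, ?_, ?_⟩ <;>
        rw [List.getElem?_append_left (by omega)] <;> tauto

-- the string digits coincide with the arithmetic digits
lemma digA_eq (n : Int) (h : 100 ≤ n) :
    ((PySem.Int.ofChars? [PySem.List.pyGetD (PySem.Int.toChars n) 0 ' ']).getD 0,
     (PySem.Int.ofChars? [PySem.List.pyGetD (PySem.Int.toChars n) 1 ' ']).getD 0,
     (PySem.Int.ofChars? [PySem.List.pyGetD (PySem.Int.toChars n) 2 ' ']).getD 0) = pvDigs n := by
  have h0 : (0 : ℤ) ≤ n := by omega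
  have hm : 100 ≤ n.toNat := by omega
  have hred : pvReduce n = (natReduce n.toNat : Int) :=
    pvReduce_eq_natReduce n.toNat n h0 rfl
  have hb := natReduce_bounds n.toNat hm
  obtain ⟨g0, g1, g2⟩ := natChars_get n.toNat hm
  have hlen := natChars_len3 hm
  rw [toChars_eq_natChars n h0]
  have e0 : PySem.List.pyGetD (natChars n.toNat) 0 ' ' = Nat.digitChar (natReduce n.toNat / 100) := by
    have hh := PySem.List.pyGetD_eq_getElem (natChars n.toNat) (i := 0) ' ' (by omega) (by simp; omega)
    rw [List.getElem?_eq_getElem (by omega)] at g0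
    rw [hh]; exact Option.some.inj g0
  have e1 : PySem.List.pyGetD (natChars n.toNat) 1 ' ' = Nat.digitChar (natReduce n.toNat / 10 % 10) := by
    have hh := PySem.List.pyGetD_eq_getElem (natChars n.toNat) (i := 1) ' ' (by omega) (by simp; omega)
    rw [List.getElem?_eq_getElem (by omega)] at g1
    rw [hh]; exact Option.some.inj g1
  have e2 : PySem.List.pyGetD (natChars n.toNat) 2 ' ' = Nat.digitChar (natReduce n.toNat % 10) := by
    have hh := PySem.List.pyGetD_eq_getElem (natChars n.toNat) (i := 2) ' ' (by omega) (by simp; omega)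
    rw [List.getElem?_eq_getElem (by omega)] at g2
    rw [hh]; exact Option.some.inj g2
  rw [e0, e1, e2,
    ofChars_digitChar (by omega : natReduce n.toNat / 100 < 10),
    ofChars_digitChar (by omega : natReduce n.toNat / 10 % 10 < 10),
    ofChars_digitChar (by omega : natReduce n.toNat % 10 < 10)]
  simp only [pvDigs, hred, Option.getD_some]
  have d100 : PySem.Int.floordiv ((natReduce n.toNat : Nat) : Int) ((100 : Nat) : Int) = ((natReduce n.toNat / 100 : Nat) : Int) :=
    PySem.Int.floordiv_natCast _ _
  have d10 : PySem.Int.floordiv ((natReduce n.toNat : Nat) : Int) ((10 : Nat) : Int) = ((natReduce n.toNat / 10 : Nat) : Int) :=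
    PySem.Int.floordiv_natCast _ _
  have m10 : PySem.Int.mod ((natReduce n.toNat / 10 : Nat) : Int) ((10 : Nat) : Int) = ((natReduce n.toNat / 10 % 10 : Nat) : Int) :=
    PySem.Int.mod_natCast _ _
  have m10' : PySem.Int.mod ((natReduce n.toNat : Nat) : Int) ((10 : Nat) : Int) = ((natReduce n.toNat % 10 : Nat) : Int) :=
    PySem.Int.mod_natCast _ _
  push_cast at d100 d10 m10 m10' ⊢
  rw [d100, d10, m10, m10']

-- ---------- dict-shape machinery (A side) ----------

def mkShape (ks : List Int) (f : Int → PySem.Set Int) : PySem.Dict Int (PySem.Set Int) :=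
  PySem.Dict.mk (ks.map (fun k => (k, f k)))

lemma keys_mkShape (ks : List Int) (f : Int → PySem.Set Int) : (mkShape ks f).keys = ks := by
  have h : ((fun x : Int × PySem.Set Int => x.1) ∘ fun k => (k, f k)) = id := rfl
  simp [mkShape, PySem.Dict.keys, h]

lemma getD_mkShape {ks : List Int} {f : Int → PySem.Set Int} {k : Int}
    (hnd : ks.Nodup) (hk : k ∈ ks) : (mkShape ks f).getD k [] = f k := by
  apply PySem.Dict.getD_of_mem_items
  · exact List.mem_map.2 ⟨k, hk, rfl⟩
  · rw [keys_mkShape]; exact hnd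

lemma contains_mkShape (ks : List Int) (f : Int → PySem.Set Int) (k : Int) :
    (mkShape ks f).contains k = decide (k ∈ ks) := by
  rw [PySem.Dict.contains_eq_decide_mem_keys, keys_mkShape]

lemma insert_mkShape {ks : List Int} {f : Int → PySem.Set Int} {k : Int} (v : PySem.Set Int)
    (hk : k ∈ ks) :
    (mkShape ks f).insert k v = mkShape ks (fun k' => if k' = k then v else f k') := by
  apply PySem.Dict.ext
  rw [PySem.Dict.items_insert_of_contains _ v (by simp [contains_mkShape, hk])]
  show (ks.map _).map _ = _
  rw [List.map_map]
  apply List.map_congr_left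
  intro a _
  by_cases hak : a = k <;> simp [hak]

lemma erase_mkShape (ks : List Int) (f : Int → PySem.Set Int) (k : Int) :
    (mkShape ks f).erase k = mkShape (ks.filter (fun a => !(a == k))) f := by
  apply PySem.Dict.ext
  show (ks.map _).filter _ = _
  rw [List.filter_map]
  rfl

-- ---------- per-key accumulator semantics of one login (A side) ----------

def bStepK (t : Int × Int × Int) (k : Int) (s : PySem.Set Int) : PySem.Set Int :=
  let s1 := if k = t.2.1 then PySem.Set.add s t.1 else s
  if k = t.2.2 then PySem.Set.add s1 t.2.1 else s1

def aStepK (t : Int × Int × Int) (k : Int) (s : PySem.Set Int) : PySem.Set Int :=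
  let s1 := if k = t.1 then PySem.Set.add s t.2.1 else s
  if k = t.2.1 then PySem.Set.add s1 t.2.2 else s1

def bAcc (T : List (Int × Int × Int)) (k : Int) : PySem.Set Int :=
  T.foldl (fun s t => bStepK t k s) []

def aAcc (T : List (Int × Int × Int)) (k : Int) : PySem.Set Int :=
  T.foldl (fun s t => aStepK t k s) []

def tKeys (T : List (Int × Int × Int)) : PySem.Set Int :=
  T.foldl (fun s t => PySem.Set.add (PySem.Set.add (PySem.Set.add s t.1) t.2.1) t.2.2) []

lemma bAcc_append (T : List (Int × Int × Int)) (t : Int × Int × Int) (k : Int) :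
    bAcc (T ++ [t]) k = bStepK t k (bAcc T k) := by
  simp [bAcc, List.foldl_append]

lemma aAcc_append (T : List (Int × Int × Int)) (t : Int × Int × Int) (k : Int) :
    aAcc (T ++ [t]) k = aStepK t k (aAcc T k) := by
  simp [aAcc, List.foldl_append]

lemma tKeys_append (T : List (Int × Int × Int)) (t : Int × Int × Int) :
    tKeys (T ++ [t]) = PySem.Set.add (PySem.Set.add (PySem.Set.add (tKeys T) t.1) t.2.1) t.2.2 := by
  simp [tKeys, List.foldl_append]

lemma mem_tKeys {T : List (Int × Int × Int)} {k : Int} :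
    k ∈ tKeys T ↔ ∃ t ∈ T, k = t.1 ∨ k = t.2.1 ∨ k = t.2.2 := by
  induction T using List.reverseRecOn with
  | nil => simp [tKeys]
  | append_singleton T t ih =>
    rw [tKeys_append]
    simp only [PySem.Set.mem_add, ih, List.mem_append, List.mem_singleton]
    constructor
    · rintro (((h | h) | h) | h)
      · obtain ⟨t', ht', hh⟩ := h; exact ⟨t', Or.inl ht', hh⟩
      · exact ⟨t, Or.inr rfl, Or.inl h⟩
      · exact ⟨t, Or.inr rfl, Or.inr (Or.inl h)⟩
      · exact ⟨t, Or.inr rfl, Or.inr (Or.inr h)⟩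
    · rintro ⟨t', ht' | rfl, hh⟩
      · exact Or.inl (Or.inl (Or.inl ⟨t', ht', hh⟩))
      · rcases hh with h | h | h
        · exact Or.inl (Or.inl (Or.inr h))
        · exact Or.inl (Or.inr h)
        · exact Or.inr h

lemma acc_nil_of_notMem {T : List (Int × Int × Int)} {k : Int} (h : k ∉ tKeys T) :
    bAcc T k = [] ∧ aAcc T k = [] := by
  induction T using List.reverseRecOn with
  | nil => simp [bAcc, aAcc]
  | append_singleton T t ih =>
    have hT : k ∉ tKeys T := fun hm => h (by rw [tKeys_append]; simp [PySem.Set.mem_add]; tauto)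
    have hx : k ≠ t.1 := fun he => h (by rw [tKeys_append]; simp [PySem.Set.mem_add]; tauto)
    have hy : k ≠ t.2.1 := fun he => h (by rw [tKeys_append]; simp [PySem.Set.mem_add]; tauto)
    have hz : k ≠ t.2.2 := fun he => h (by rw [tKeys_append]; simp [PySem.Set.mem_add]; tauto)
    obtain ⟨hb, ha⟩ := ih hT
    rw [bAcc_append, aAcc_append, hb, ha]
    simp [bStepK, aStepK, hx, hy, hz]

lemma add_ne_nil (s : PySem.Set Int) (x : Int) : PySem.Set.add s x ≠ [] := by
  rw [PySem.Set.add_eq_ite]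
  split
  · intro h; subst h; simp_all
  · simp

lemma bStepK_ne_nil {t : Int × Int × Int} {k : Int} {s : PySem.Set Int} (h : s ≠ []) :
    bStepK t k s ≠ [] := by
  simp only [bStepK]
  split <;> split <;> first | exact add_ne_nil _ _ | exact h

lemma aStepK_ne_nil {t : Int × Int × Int} {k : Int} {s : PySem.Set Int} (h : s ≠ []) :
    aStepK t k s ≠ [] := by
  simp only [aStepK]
  split <;> split <;> first | exact add_ne_nil _ _ | exact h

lemma bStepK_ne_nil' {t : Int × Int × Int} {k : Int} {s : PySem.Set Int}
    (h : k = t.2.1 ∨ k = t.2.2) : bStepK t k s ≠ [] := by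
  simp only [bStepK]
  rcases h with h | h
  · rw [if_pos h]
    split
    · exact add_ne_nil _ _
    · exact add_ne_nil _ _
  · rw [if_pos h]
    exact add_ne_nil _ _

lemma aStepK_ne_nil' {t : Int × Int × Int} {k : Int} {s : PySem.Set Int}
    (h : k = t.1 ∨ k = t.2.1) : aStepK t k s ≠ [] := by
  simp only [aStepK]
  rcases h with h | h
  · rw [if_pos h]
    split
    · exact add_ne_nil _ _
    · exact add_ne_nil _ _
  · rw [if_pos h]
    exact add_ne_nil _ _

lemma acc_ne_nil_of_mem {T : List (Int × Int × Int)} {k : Int} (h : k ∈ tKeys T) :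
    ¬ (bAcc T k = [] ∧ aAcc T k = []) := by
  induction T using List.reverseRecOn with
  | nil => simp [tKeys] at h
  | append_singleton T t ih =>
    rw [bAcc_append, aAcc_append]
    rw [tKeys_append] at h
    simp only [PySem.Set.mem_add] at h
    rintro ⟨hb, ha⟩
    by_cases hT : k ∈ tKeys T
    · rcases (not_and_or.1 (ih hT)) with hne | hne
      · exact hne (by by_contra hc; exact (bStepK_ne_nil hc) hb)
      · exact hne (by by_contra hc; exact (aStepK_ne_nil hc) ha)
    · have hk : k = t.1 ∨ k = t.2.1 ∨ k = t.2.2 := by tauto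
      rcases hk with hk | hk | hk
      · exact aStepK_ne_nil' (Or.inl hk) ha
      · exact bStepK_ne_nil' (Or.inl hk) hb
      · exact bStepK_ne_nil' (Or.inr hk) hb

-- ---------- A's fold invariant ----------

def pvR : List Int := [0, 1, 2, 3, 4, 5, 6, 7, 8, 9]

lemma pvR_nodup : pvR.Nodup := by decide

lemma mem_pvR {k : Int} : k ∈ pvR ↔ 0 ≤ k ∧ k < 10 := by
  simp [pvR]; omega

lemma insert2_shape (ks : List Int) (f : Int → PySem.Set Int) (k1 a1 k2 a2 : Int)
    (hnd : ks.Nodup) (h1 : k1 ∈ ks) (h2 : k2 ∈ ks) :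
    ((mkShape ks f).insert k1 (PySem.Set.add ((mkShape ks f).getD k1 []) a1)).insert k2
      (PySem.Set.add
        (((mkShape ks f).insert k1 (PySem.Set.add ((mkShape ks f).getD k1 []) a1)).getD k2 []) a2)
    = mkShape ks (fun k =>
        if k = k2 then PySem.Set.add (if k = k1 then PySem.Set.add (f k) a1 else f k) a2
        else if k = k1 then PySem.Set.add (f k) a1 else f k) := by
  rw [getD_mkShape hnd h1, insert_mkShape _ h1, getD_mkShape hnd h2, insert_mkShape _ h2]
  congr 1
  funext k
  by_cases hk2 : k = k2
  · subst hk2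
    by_cases hk1 : k = k1
    · subst hk1; simp
    · simp [hk1]
  · by_cases hk1 : k = k1
    · subst hk1; simp [hk2]
    · simp [hk2, hk1]

-- one processed login, acting on a pair of shaped dicts
def stepT (st : PySem.Dict Int (PySem.Set Int) × PySem.Dict Int (PySem.Set Int))
    (t : Int × Int × Int) : PySem.Dict Int (PySem.Set Int) × PySem.Dict Int (PySem.Set Int) :=
  let b1 := st.1.insert t.2.1 (PySem.Set.add (st.1.getD t.2.1 []) t.1)
  let b2 := b1.insert t.2.2 (PySem.Set.add (b1.getD t.2.2 []) t.2.1)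
  let a1 := st.2.insert t.1 (PySem.Set.add (st.2.getD t.1 []) t.2.1)
  let a2 := a1.insert t.2.1 (PySem.Set.add (a1.getD t.2.1 []) t.2.2)
  (b2, a2)

lemma stepT_shape {ks : List Int} {f g : Int → PySem.Set Int} {t : Int × Int × Int}
    (hnd : ks.Nodup) (hx : t.1 ∈ ks) (hy : t.2.1 ∈ ks) (hz : t.2.2 ∈ ks) :
    stepT (mkShape ks f, mkShape ks g) t
      = (mkShape ks (fun k => bStepK t k (f k)), mkShape ks (fun k => aStepK t k (g k))) := by
  simp only [stepT]
  rw [insert2_shape ks f t.2.1 t.1 t.2.2 t.2.1 hnd hy hz,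
    insert2_shape ks g t.1 t.2.1 t.2.1 t.2.2 hnd hx hy]
  rfl

lemma foldA_inv (T : List (Int × Int × Int))
    (hT : ∀ t ∈ T, t.1 ∈ pvR ∧ t.2.1 ∈ pvR ∧ t.2.2 ∈ pvR) :
    T.foldl stepT (mkShape pvR (fun _ => []), mkShape pvR (fun _ => []))
      = (mkShape pvR (bAcc T), mkShape pvR (aAcc T)) := by
  induction T using List.reverseRecOn with
  | nil => rfl
  | append_singleton T t ih =>
    obtain ⟨hx, hy, hz⟩ := hT t (by simp)
    rw [List.foldl_append, ih (fun t' ht' => hT t' (by simp [ht']))]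
    simp only [List.foldl_cons, List.foldl_nil]
    rw [stepT_shape pvR_nodup hx hy hz]
    have hb : (fun k => bStepK t k (bAcc T k)) = bAcc (T ++ [t]) := by
      funext k; rw [bAcc_append]
    have ha : (fun k => aStepK t k (aAcc T k)) = aAcc (T ++ [t]) := by
      funext k; rw [aAcc_append]
    rw [hb, ha]

-- ---------- B's pair relation and its per-key selections ----------

def pairStep (P : PySem.Set (Int × Int)) (t : Int × Int × Int) : PySem.Set (Int × Int) :=
  PySem.Set.add (PySem.Set.add P (t.1, t.2.1)) (t.2.1, t.2.2)

def pairsOfT (T : List (Int × Int × Int)) : PySem.Set (Int × Int) :=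
  T.foldl pairStep []

lemma pairsOfT_append (T : List (Int × Int × Int)) (t : Int × Int × Int) :
    pairsOfT (T ++ [t]) = pairStep (pairsOfT T) t := by
  simp [pairsOfT, List.foldl_append]

lemma mem_pairsOfT {T : List (Int × Int × Int)} {p : Int × Int} :
    p ∈ pairsOfT T ↔ ∃ t ∈ T, p = (t.1, t.2.1) ∨ p = (t.2.1, t.2.2) := by
  induction T using List.reverseRecOn with
  | nil => simp [pairsOfT]
  | append_singleton T t ih =>
    rw [pairsOfT_append]
    simp only [pairStep, PySem.Set.mem_add, ih, List.mem_append, List.mem_singleton]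
    constructor
    · rintro ((⟨t', ht', hh⟩ | h) | h)
      · exact ⟨t', Or.inl ht', hh⟩
      · exact ⟨t, Or.inr rfl, Or.inl h⟩
      · exact ⟨t, Or.inr rfl, Or.inr h⟩
    · rintro ⟨t', ht' | rfl, hh⟩
      · exact Or.inl (Or.inl ⟨t', ht', hh⟩)
      · rcases hh with h | h
        · exact Or.inl (Or.inr h)
        · exact Or.inr h

def bSel (P : List (Int × Int)) (k : Int) : PySem.Set Int :=
  P.foldl (fun s p => if p.2 = k then PySem.Set.add s p.1 else s) []

def aSel (P : List (Int × Int)) (k : Int) : PySem.Set Int :=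
  P.foldl (fun s p => if p.1 = k then PySem.Set.add s p.2 else s) []

lemma bSel_append (P : List (Int × Int)) (p : Int × Int) (k : Int) :
    bSel (P ++ [p]) k = if p.2 = k then PySem.Set.add (bSel P k) p.1 else bSel P k := by
  simp [bSel, List.foldl_append]

lemma aSel_append (P : List (Int × Int)) (p : Int × Int) (k : Int) :
    aSel (P ++ [p]) k = if p.1 = k then PySem.Set.add (aSel P k) p.2 else aSel P k := by
  simp [aSel, List.foldl_append]

lemma mem_bSel {P : List (Int × Int)} {k x : Int} : x ∈ bSel P k ↔ (x, k) ∈ P := by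
  induction P using List.reverseRecOn with
  | nil => simp [bSel]
  | append_singleton P p ih =>
    rw [bSel_append]
    by_cases hp : p.2 = k
    · rw [if_pos hp]
      simp only [PySem.Set.mem_add, ih, List.mem_append, List.mem_singleton]
      constructor
      · rintro (h | rfl)
        · exact Or.inl h
        · exact Or.inr (by rw [← hp])
      · rintro (h | h)
        · exact Or.inl h
        · exact Or.inr (congrArg Prod.fst h)
    · rw [if_neg hp]
      simp only [ih, List.mem_append, List.mem_singleton]
      constructor
      · exact Or.inl
      · rintro (h | h)
        · exact h
        · exact absurd (congrArg Prod.snd h.symm) hp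

lemma mem_aSel {P : List (Int × Int)} {k y : Int} : y ∈ aSel P k ↔ (k, y) ∈ P := by
  induction P using List.reverseRecOn with
  | nil => simp [aSel]
  | append_singleton P p ih =>
    rw [aSel_append]
    by_cases hp : p.1 = k
    · rw [if_pos hp]
      simp only [PySem.Set.mem_add, ih, List.mem_append, List.mem_singleton]
      constructor
      · rintro (h | rfl)
        · exact Or.inl h
        · exact Or.inr (by rw [← hp])
      · rintro (h | h)
        · exact Or.inl h
        · exact Or.inr (congrArg Prod.snd h)
    · rw [if_neg hp]
      simp only [ih, List.mem_append, List.mem_singleton]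
      constructor
      · exact Or.inl
      · rintro (h | h)
        · exact h
        · exact absurd (congrArg Prod.fst h.symm) hp

lemma bSel_add (P : List (Int × Int)) (p : Int × Int) (k : Int) :
    bSel (PySem.Set.add P p) k = if p.2 = k then PySem.Set.add (bSel P k) p.1 else bSel P k := by
  by_cases hp : p ∈ P
  · rw [PySem.Set.add_of_mem hp]
    by_cases h2 : p.2 = k
    · rw [if_pos h2, PySem.Set.add_of_mem (mem_bSel.2 (by rw [show (p.1, k) = p by rw [← h2]]; exact hp))]
    · rw [if_neg h2]
  · rw [PySem.Set.add_of_not_mem hp, bSel_append]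

lemma aSel_add (P : List (Int × Int)) (p : Int × Int) (k : Int) :
    aSel (PySem.Set.add P p) k = if p.1 = k then PySem.Set.add (aSel P k) p.2 else aSel P k := by
  by_cases hp : p ∈ P
  · rw [PySem.Set.add_of_mem hp]
    by_cases h1 : p.1 = k
    · rw [if_pos h1, PySem.Set.add_of_mem (mem_aSel.2 (by rw [show (k, p.2) = p by rw [← h1]]; exact hp))]
    · rw [if_neg h1]
  · rw [PySem.Set.add_of_not_mem hp, aSel_append]

-- A's per-key accumulator is exactly B's selection from the pair relation
lemma bSel_pairs (T : List (Int × Int × Int)) (k : Int) : bSel (pairsOfT T) k = bAcc T k := by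
  induction T using List.reverseRecOn with
  | nil => rfl
  | append_singleton T t ih =>
    rw [pairsOfT_append, bAcc_append]
    simp only [pairStep, bSel_add, ih, bStepK]
    by_cases hy : t.2.1 = k <;> by_cases hz : t.2.2 = k
    · simp [hy, hz]
    · simp [hy, hz, Ne.symm hz]
    · simp [hy, hz, Ne.symm hy]
    · simp [hy, hz, Ne.symm hy, Ne.symm hz]

lemma aSel_pairs (T : List (Int × Int × Int)) (k : Int) : aSel (pairsOfT T) k = aAcc T k := by
  induction T using List.reverseRecOn with
  | nil => rfl
  | append_singleton T t ih =>
    rw [pairsOfT_append, aAcc_append]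
    simp only [pairStep, aSel_add, ih, aStepK]
    by_cases hx : t.1 = k <;> by_cases hy : t.2.1 = k
    · simp [hx, hy]
    · simp [hx, hy, Ne.symm hy]
    · simp [hx, hy, Ne.symm hx]
    · simp [hx, hy, Ne.symm hx, Ne.symm hy]

-- ---------- B's digit set ----------

def digsOf (P : List (Int × Int)) : PySem.Set Int :=
  P.foldl (fun D p => PySem.Set.add (PySem.Set.add D p.1) p.2) []

lemma digsOf_append (P : List (Int × Int)) (p : Int × Int) :
    digsOf (P ++ [p]) = PySem.Set.add (PySem.Set.add (digsOf P) p.1) p.2 := by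
  simp [digsOf, List.foldl_append]

lemma digsOf_nodup (P : List (Int × Int)) : (digsOf P).Nodup := by
  induction P using List.reverseRecOn with
  | nil => simp [digsOf]
  | append_singleton P p ih =>
    rw [digsOf_append]
    exact PySem.Set.nodup_add _ _ (PySem.Set.nodup_add _ _ ih)

lemma mem_digsOf {P : List (Int × Int)} {x : Int} :
    x ∈ digsOf P ↔ ∃ p ∈ P, x = p.1 ∨ x = p.2 := by
  induction P using List.reverseRecOn with
  | nil => simp [digsOf]
  | append_singleton P p ih =>
    rw [digsOf_append]
    simp only [PySem.Set.mem_add, ih, List.mem_append, List.mem_singleton]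
    constructor
    · rintro ((⟨p', hp', hh⟩ | h) | h)
      · exact ⟨p', Or.inl hp', hh⟩
      · exact ⟨p, Or.inr rfl, Or.inl h⟩
      · exact ⟨p, Or.inr rfl, Or.inr h⟩
    · rintro ⟨p', hp' | rfl, hh⟩
      · exact Or.inl (Or.inl ⟨p', hp', hh⟩)
      · rcases hh with h | h
        · exact Or.inl (Or.inr h)
        · exact Or.inr h

lemma mem_digsOf_pairs {T : List (Int × Int × Int)} {x : Int} :
    x ∈ digsOf (pairsOfT T) ↔ x ∈ tKeys T := by
  rw [mem_digsOf, mem_tKeys]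
  constructor
  · rintro ⟨p, hp, hh⟩
    obtain ⟨t, ht, hpt⟩ := mem_pairsOfT.1 hp
    refine ⟨t, ht, ?_⟩
    rcases hpt with rfl | rfl <;> rcases hh with h | h <;> simp_all
  · rintro ⟨t, ht, hh⟩
    rcases hh with rfl | rfl | rfl
    · exact ⟨(t.1, t.2.1), mem_pairsOfT.2 ⟨t, ht, Or.inl rfl⟩, Or.inl rfl⟩
    · exact ⟨(t.1, t.2.1), mem_pairsOfT.2 ⟨t, ht, Or.inl rfl⟩, Or.inr rfl⟩
    · exact ⟨(t.2.1, t.2.2), mem_pairsOfT.2 ⟨t, ht, Or.inr rfl⟩, Or.inr rfl⟩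

-- ---------- the final deletion loop of A ----------

lemma equal_nil (s : PySem.Set Int) : PySem.Set.equal s [] = decide (s = []) := by
  by_cases h : s = []
  · simp [h, (PySem.Set.equal_iff ([] : PySem.Set Int) []).2 (by simp)]
  · have hne : ¬ (PySem.Set.equal s [] = true) := by
      intro hc
      exact h (List.eq_nil_iff_forall_not_mem.2
        (fun x hx => by simpa using ((PySem.Set.equal_iff s []).1 hc x).1 hx))
    simp [h]
    exact Bool.eq_false_iff.2 hne

def eraseStep (st : PySem.Dict Int (PySem.Set Int) × PySem.Dict Int (PySem.Set Int)) (k : Int) :=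
  if PySem.Set.equal (st.1.getD k []) [] && PySem.Set.equal (st.2.getD k []) [] then
    (st.1.erase k, st.2.erase k)
  else st

lemma foldErase : ∀ (ks ds : List Int) (f g : Int → PySem.Set Int), ks.Nodup → ds.Nodup →
    (∀ k ∈ ks, k ∈ ds) →
    ks.foldl eraseStep (mkShape ds f, mkShape ds g) =
      (mkShape (ds.filter (fun a => decide (a ∈ ks → ¬(f a = [] ∧ g a = [])))) f,
       mkShape (ds.filter (fun a => decide (a ∈ ks → ¬(f a = [] ∧ g a = [])))) g) := by
  intro ks
  induction ks with
  | nil =>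
    intro ds f g _ _ _
    simp
  | cons k ks ih =>
    intro ds f g hknd hdnd hsub
    have hkds : k ∈ ds := hsub k (by simp)
    have hkks : k ∉ ks := (List.nodup_cons.1 hknd).1
    simp only [List.foldl_cons]
    rw [show eraseStep (mkShape ds f, mkShape ds g) k =
        (if f k = [] ∧ g k = [] then
          ((mkShape ds f).erase k, (mkShape ds g).erase k)
        else (mkShape ds f, mkShape ds g)) by
      simp only [eraseStep, getD_mkShape hdnd hkds, equal_nil]
      by_cases hfg : f k = [] ∧ g k = []
      · rw [if_pos hfg, if_pos (by simp [hfg.1, hfg.2])]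
      · rw [if_neg hfg, if_neg (by
          intro hc
          simp only [Bool.and_eq_true, decide_eq_true_eq] at hc
          exact hfg hc)]]
    by_cases hfg : f k = [] ∧ g k = []
    · rw [if_pos hfg, erase_mkShape, erase_mkShape,
        ih (ds.filter (fun a => !(a == k))) f g (List.nodup_cons.1 hknd).2
          (hdnd.filter _)
          (fun k' hk' => List.mem_filter.2 ⟨hsub k' (by simp [hk']),
            by simp; intro he; exact hkks (he ▸ hk')⟩)]
      rw [List.filter_filter]
      have : ∀ a ∈ ds,
          (decide (a ∈ ks → ¬(f a = [] ∧ g a = [])) && !(a == k))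
            = decide (a ∈ k :: ks → ¬(f a = [] ∧ g a = [])) := by
        intro a _
        by_cases hak : a = k
        · subst hak
          simp [hfg.1, hfg.2]
        · simp [hak]
      rw [List.filter_congr this]
    · rw [if_neg hfg, ih ds f g (List.nodup_cons.1 hknd).2 hdnd
        (fun k' hk' => hsub k' (by simp [hk']))]
      have : ∀ a ∈ ds,
          decide (a ∈ ks → ¬(f a = [] ∧ g a = []))
            = decide (a ∈ k :: ks → ¬(f a = [] ∧ g a = [])) := by
        intro a _
        by_cases hak : a = k
        · subst hak
          simp [hkks, hfg]
        · simp [hak]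
      rw [List.filter_congr this]

-- ---------- assembling the two programs ----------

def bodyA (st : PySem.Dict Int (PySem.Set Int) × PySem.Dict Int (PySem.Set Int))
    (s : List Char) : PySem.Dict Int (PySem.Set Int) × PySem.Dict Int (PySem.Set Int) :=
  let i0 := (PySem.Int.ofChars? [PySem.List.pyGetD s 0 ' ']).getD 0
  let i1 := (PySem.Int.ofChars? [PySem.List.pyGetD s 1 ' ']).getD 0
  let i2 := (PySem.Int.ofChars? [PySem.List.pyGetD s 2 ' ']).getD 0
  let b1 := st.1.insert i1 (PySem.Set.union (st.1.getD i1 []) [i0])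
  let b2 := b1.insert i2 (PySem.Set.union (b1.getD i2 []) [i1])
  let a1 := st.2.insert i0 (PySem.Set.union (st.2.getD i0 []) [i1])
  let a2 := a1.insert i1 (PySem.Set.union (a1.getD i1 []) [i2])
  (b2, a2)

lemma bodyA_eq_stepT (st : PySem.Dict Int (PySem.Set Int) × PySem.Dict Int (PySem.Set Int))
    {n : Int} (hn : 100 ≤ n) : bodyA st (PySem.Int.toChars n) = stepT st (pvDigs n) := by
  have h := digA_eq n hn
  have h0 := congrArg (fun p : Int × Int × Int => p.1) h
  have h1 := congrArg (fun p : Int × Int × Int => p.2.1) h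
  have h2 := congrArg (fun p : Int × Int × Int => p.2.2) h
  simp only at h0 h1 h2
  have hu : ∀ (s : PySem.Set Int) (x : Int), PySem.Set.union s [x] = PySem.Set.add s x :=
    fun _ _ => rfl
  simp only [bodyA, stepT, h0, h1, h2, hu]

def bodyP (P : PySem.Set (Int × Int)) (s : List Char) : PySem.Set (Int × Int) :=
  let d0 := (PySem.Int.ofChars? [PySem.List.pyGetD s 0 ' ']).getD 0
  let d1 := (PySem.Int.ofChars? [PySem.List.pyGetD s 1 ' ']).getD 0
  let d2 := (PySem.Int.ofChars? [PySem.List.pyGetD s 2 ' ']).getD 0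
  PySem.Set.add (PySem.Set.add P (d0, d1)) (d1, d2)

lemma bodyP_eq_pairStep (P : PySem.Set (Int × Int)) {n : Int} (hn : 100 ≤ n) :
    bodyP P (PySem.Int.toChars n) = pairStep P (pvDigs n) := by
  have h := digA_eq n hn
  have h0 := congrArg (fun p : Int × Int × Int => p.1) h
  have h1 := congrArg (fun p : Int × Int × Int => p.2.1) h
  have h2 := congrArg (fun p : Int × Int × Int => p.2.2) h
  simp only at h0 h1 h2
  simp only [bodyP, pairStep, h0, h1, h2]

lemma pvDigs_mem_pvR {n : Int} (hn : 100 ≤ n) :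
    (pvDigs n).1 ∈ pvR ∧ (pvDigs n).2.1 ∈ pvR ∧ (pvDigs n).2.2 ∈ pvR := by
  obtain ⟨hlo, hhi⟩ := pvReduce_bounds hn
  have hd : PySem.Int.floordiv (pvReduce n) 100 = pvReduce n / 100 :=
    PySem.Int.floordiv_eq_ediv_of_pos (by omega)
  have hd10 : PySem.Int.floordiv (pvReduce n) 10 = pvReduce n / 10 :=
    PySem.Int.floordiv_eq_ediv_of_pos (by omega)
  have hm1 : 0 ≤ PySem.Int.mod (PySem.Int.floordiv (pvReduce n) 10) 10 :=
    PySem.Int.mod_nonneg _ (by omega)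
  have hm1' : PySem.Int.mod (PySem.Int.floordiv (pvReduce n) 10) 10 < 10 :=
    PySem.Int.mod_lt _ (by omega)
  have hm2 : 0 ≤ PySem.Int.mod (pvReduce n) 10 := PySem.Int.mod_nonneg _ (by omega)
  have hm2' : PySem.Int.mod (pvReduce n) 10 < 10 := PySem.Int.mod_lt _ (by omega)
  refine ⟨mem_pvR.2 ?_, mem_pvR.2 ⟨hm1, hm1'⟩, mem_pvR.2 ⟨hm2, hm2'⟩⟩
  simp only [pvDigs, hd]
  omega

-- ===== VERDICT (by name: the statement is the Claim_ definition above) =====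
theorem find_before_and_after_spec : Claim_equal_find_before_and_after := by
  intro logins _hDom hPre
  unfold Spec_find_before_and_after
  -- shared first phase: the sorted, deduplicated logins and their digit triples
  have hsl : ∀ n ∈ PySem.List.sorted (PySem.Set.ofList logins) (fun x => x), (100 : Int) ≤ n := by
    intro n hn
    have hmem : n ∈ PySem.Set.ofList logins :=
      (PySem.List.sorted_perm (PySem.Set.ofList logins) (fun x => x) false).mem_iff.1 hn
    exact hPre n (by simpa using (PySem.Set.mem_ofList _ _).1 hmem)
  set sl := PySem.List.sorted (PySem.Set.ofList logins) (fun x => x) with hsldef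
  set T := sl.map pvDigs with hTdef
  have hT : ∀ t ∈ T, t.1 ∈ pvR ∧ t.2.1 ∈ pvR ∧ t.2.2 ∈ pvR := by
    intro t ht
    obtain ⟨n, hn, rfl⟩ := List.mem_map.1 ht
    exact pvDigs_mem_pvR (hsl n hn)
  have hsub : ∀ a ∈ tKeys T, a ∈ pvR := by
    intro a ha
    obtain ⟨t, ht, hh⟩ := mem_tKeys.1 ha
    obtain ⟨h1, h2, h3⟩ := hT t ht
    rcases hh with rfl | rfl | rfl <;> assumption
  -- A
  have hA : find_before_and_after logins =
      (let st := (PySem.List.pyRange 0 (PySem.List.len (sl.map PySem.Int.toChars))).foldl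
          (fun st k => bodyA st (PySem.List.pyGetD (sl.map PySem.Int.toChars) k []))
          (mkShape pvR (fun _ => []), mkShape pvR (fun _ => []))
       let st2 := st.1.keys.foldl eraseStep st
       (st2.1.items, st2.2.items)) := rfl
  have hA2 := PySem.List.foldl_pyRange_pyGetD (sl.map PySem.Int.toChars) [] bodyA
    (mkShape pvR (fun _ => []), mkShape pvR (fun _ => [])) (le_refl 0)
  rw [Int.toNat_zero, List.drop_zero] at hA2
  have hA3 : (sl.map PySem.Int.toChars).foldl bodyA
      (mkShape pvR (fun _ => []), mkShape pvR (fun _ => []))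
      = (mkShape pvR (bAcc T), mkShape pvR (aAcc T)) := by
    rw [List.foldl_map]
    have hc : List.foldl (fun x y => bodyA x (PySem.Int.toChars y))
        (mkShape pvR fun _ => [], mkShape pvR fun _ => []) sl
        = List.foldl (fun st n => stepT st (pvDigs n))
          (mkShape pvR fun _ => [], mkShape pvR fun _ => []) sl := by
      apply PySem.List.foldl_congr_mem
      intro acc x hx
      exact bodyA_eq_stepT acc (hsl x hx)
    rw [hc, ← List.foldl_map, ← hTdef]
    exact foldA_inv T hT
  rw [hA]
  simp only [hA2, hA3]
  rw [keys_mkShape, foldErase pvR pvR (bAcc T) (aAcc T) pvR_nodup pvR_nodup (fun k hk => hk)]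
  -- the surviving keys are exactly the digits that occur
  have hq : ∀ a ∈ pvR, decide (a ∈ pvR → ¬(bAcc T a = [] ∧ aAcc T a = []))
      = decide (a ∈ tKeys T) := by
    intro a ha
    simp only [decide_eq_decide]
    constructor
    · intro hp
      by_contra hmem
      exact hp ha (acc_nil_of_notMem hmem)
    · intro hmem _
      exact acc_ne_nil_of_mem hmem
  rw [List.filter_congr hq]
  -- B
  have hB : find_before_and_after_alt logins =
      (let pairs := (sl.map PySem.Int.toChars).foldl bodyP []
       let digits := PySem.List.sorted (digsOf pairs) (fun x => x)
       let before := digits.foldl (fun d k => d.insert k (bSel pairs k)) (PySem.Dict.mk [])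
       let after := digits.foldl (fun d k => d.insert k (aSel pairs k)) (PySem.Dict.mk [])
       (before.items, after.items)) := rfl
  have hB2 : (sl.map PySem.Int.toChars).foldl bodyP ([] : PySem.Set (Int × Int)) = pairsOfT T := by
    rw [List.foldl_map]
    have hc : List.foldl (fun P n => bodyP P (PySem.Int.toChars n)) ([] : PySem.Set (Int × Int)) sl
        = List.foldl (fun P n => pairStep P (pvDigs n)) [] sl := by
      apply PySem.List.foldl_congr_mem
      intro acc x hx
      exact bodyP_eq_pairStep acc (hsl x hx)
    rw [hc, ← List.foldl_map, ← hTdef]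
    rfl
  rw [hB]
  simp only [hB2]
  have hsorted : PySem.List.sorted (digsOf (pairsOfT T)) (fun x => x)
      = pvR.filter (fun a => decide (a ∈ tKeys T)) := by
    apply PySem.List.sorted_eq_of_perm_of_pairwise_lt
    · rw [List.perm_ext_iff_of_nodup (List.Nodup.filter _ pvR_nodup) (digsOf_nodup _)]
      intro a
      simp only [List.mem_filter, decide_eq_true_eq, mem_digsOf_pairs]
      exact ⟨fun h => h.2, fun h => ⟨hsub a h, h⟩⟩
    · exact List.Pairwise.filter _ (by decide : List.Pairwise (fun a b : Int => a < b) pvR)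
  rw [hsorted]
  have hfoldb : ((pvR.filter (fun a => decide (a ∈ tKeys T))).foldl
        (fun d k => d.insert k (bSel (pairsOfT T) k)) (PySem.Dict.mk [])).items
      = (mkShape (pvR.filter (fun a => decide (a ∈ tKeys T))) (bAcc T)).items := by
    rw [PySem.Dict.items_foldl_insert_fresh (pvR.filter (fun a => decide (a ∈ tKeys T)))
      (fun k => k) (fun k => bSel (pairsOfT T) k) (PySem.Dict.mk [])
      (fun a _ => rfl) (by simpa using List.Nodup.filter (fun a => decide (a ∈ tKeys T)) pvR_nodup)]
    show (pvR.filter _).map _ = (pvR.filter _).map _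
    apply List.map_congr_left
    intro k _
    rw [bSel_pairs]
  have hfolda : ((pvR.filter (fun a => decide (a ∈ tKeys T))).foldl
        (fun d k => d.insert k (aSel (pairsOfT T) k)) (PySem.Dict.mk [])).items
      = (mkShape (pvR.filter (fun a => decide (a ∈ tKeys T))) (aAcc T)).items := by
    rw [PySem.Dict.items_foldl_insert_fresh (pvR.filter (fun a => decide (a ∈ tKeys T)))
      (fun k => k) (fun k => aSel (pairsOfT T) k) (PySem.Dict.mk [])
      (fun a _ => rfl) (by simpa using List.Nodup.filter (fun a => decide (a ∈ tKeys T)) pvR_nodup)]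
    show (pvR.filter _).map _ = (pvR.filter _).map _
    apply List.map_congr_left
    intro k _
    rw [aSel_pairs]
  simp only [hfoldb, hfolda]
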